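-- pv_equiv track=rewrite | github.com/desiramadani-2004/vigenere-cipher | vigenere_analysis.py | kasiski_examination
-- ===== SOURCE A (Python) =====
-- from collections import Counter, defaultdict
--
-- def clean_text(s: str) -> str:
--     """Bersihkan teks: ambil huruf A-Z saja dan konversi ke uppercase."""
--     return "".join([c for c in s.upper() if c.isalpha()])
--
-- def kasiski_examination(text: str, min_len: int = 3, max_len: int = 5) -> dict:
--     """
--     Cari pola n-gram berulang (n dari min_len sampai max_len).
--     Untuk setiap pola yang muncul >1, hitung jarak antar kemunculan.
--     Kembalikan dict: pattern -> list of distances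
--     """
--     t = clean_text(text)
--     results = {}
--     for n in range(min_len, max_len + 1):
--         positions = defaultdict(list)
--         for i in range(len(t) - n + 1):
--             chunk = t[i:i + n]
--             positions[chunk].append(i)
--         # patterns with multiple occurrences
--         for chunk, pos_list in positions.items():
--             if len(pos_list) > 1:
--                 distances = []
--                 for i in range(1, len(pos_list)):
--                     distances.append(pos_list[i] - pos_list[i - 1])
--                 results.setdefault(chunk, []).extend(distances)
--     return results
-- ===== SOURCE B (Python) =====
-- def clean_text(s: str) -> str:
--     """Bersihkan teks: ambil huruf A-Z saja dan konversi ke uppercase."""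
--     return "".join([c for c in s.upper() if c.isalpha()])
--
-- def kasiski_examination(text: str, min_len: int = 3, max_len: int = 5) -> dict:
--     """First-occurrence driven: no dict of position lists at all.  When a scan
--     meets an n-gram for the first time, its later occurrences are enumerated
--     directly with str.find, and the gaps are emitted on the spot."""
--     t = clean_text(text)
--     results = {}
--     for n in range(min_len, max_len + 1):
--         seen = set()
--         for i in range(len(t) - n + 1):
--             chunk = t[i:i + n]
--             if chunk in seen:
--                 continue
--             seen.add(chunk)
--             pos = [i]
--             j = t.find(chunk, i + 1)
--             while j != -1:
--                 pos.append(j)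
--                 j = t.find(chunk, j + 1)
--             if len(pos) > 1:
--                 results.setdefault(chunk, []).extend(
--                     pos[k] - pos[k - 1] for k in range(1, len(pos)))
--     return results
-- ===== Notes on version B (the rewrite author's own statement) =====
-- stated objective: alternative
-- what changed: B drops A's dict of position lists entirely: it scans each n-gram once, and at a chunk's first occurrence enumerates all its later occurrences directly with repeated str.find (a seen-set skips repeats), emitting the gaps on the spot instead of building position lists and differencing them in a second pass.
-- intended difference: For min_len <= -1 (with min_len <= max_len so the range is nonempty) A slices t[i:i+n] with negative n, reading '' at phantom positions past the end of the text and returning {'': [1]*(len(t)-n)} gap lists; B's find-based enumeration stops at the text's end, the intended behaviour since n-grams of negative length do not exist. — e.g. on kasiski_examination("", -1, -1): A returns [("", [1])], B returns []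
import Mathlib
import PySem

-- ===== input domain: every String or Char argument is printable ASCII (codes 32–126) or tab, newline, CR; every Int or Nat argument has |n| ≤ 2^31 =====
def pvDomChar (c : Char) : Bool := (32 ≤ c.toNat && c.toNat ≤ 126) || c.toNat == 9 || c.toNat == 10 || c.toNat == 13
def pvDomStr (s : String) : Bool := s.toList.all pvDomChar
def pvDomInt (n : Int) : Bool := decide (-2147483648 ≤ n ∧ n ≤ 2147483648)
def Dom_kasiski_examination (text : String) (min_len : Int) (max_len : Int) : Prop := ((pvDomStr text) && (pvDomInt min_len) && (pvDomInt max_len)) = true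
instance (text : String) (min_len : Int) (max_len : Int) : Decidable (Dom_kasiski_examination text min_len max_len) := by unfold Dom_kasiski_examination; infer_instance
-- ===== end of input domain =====

-- B re-implements the Kasiski scan first-occurrence-driven: no dict of position lists —
-- when an n-gram is met for the first time its later occurrences are enumerated directly
-- with str.find and the gaps emitted on the spot (objective: alternative).

-- ===== PORT A =====
-- clean_text: "".join([c for c in s.upper() if c.isalpha()]); join of single characters = ofList
def pvClean (s : String) : String :=
  String.ofList ((PySem.Str.upper s).toList.filter PySem.Str.isalpha)

-- the inner 'for i in range(1, len(pos_list)): distances.append(...)' loop of A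
def pvDistLoop (pos_list : List Int) : List Int :=
  (PySem.List.pyRange 1 (pos_list.length : Int) 1).foldl
    (fun distances i =>
      distances ++ [PySem.List.pyGetD pos_list i 0 - PySem.List.pyGetD pos_list (i - 1) 0]) []

-- 'positions = defaultdict(list); for i in range(len(t)-n+1): positions[t[i:i+n]].append(i)'
def pvStepA (t : String) (n : Int) (d : PySem.Dict String (List Int)) (i : Int) :
    PySem.Dict String (List Int) :=
  d.modify (PySem.Str.slice t (some i) (some (i + n))) [] (· ++ [i])

def pvInnerA (t : String) (n : Int) : PySem.Dict String (List Int) :=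
  (PySem.List.pyRange 0 (PySem.Str.len t - n + 1) 1).foldl (pvStepA t n) PySem.Dict.empty

-- 'for chunk, pos_list in positions.items(): if len(pos_list) > 1: ... setdefault/extend'
def pvCollectA (positions : PySem.Dict String (List Int))
    (results : PySem.Dict String (List Int)) : PySem.Dict String (List Int) :=
  positions.items.foldl
    (fun r q => if q.2.length > 1 then r.insert q.1 (r.getD q.1 [] ++ pvDistLoop q.2) else r)
    results

def kasiski_examination (text : String) (min_len : Int) (max_len : Int) : List (String × List Int) :=
  let t := pvClean text
  ((PySem.List.pyRange min_len (max_len + 1) 1).foldl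
    (fun results n => pvCollectA (pvInnerA t n) results) PySem.Dict.empty).items

-- ===== PORT B =====
-- 'while j != -1: pos.append(j); j = t.find(chunk, j + 1)' — fuel is only a totality guard
def pvWhileB (t chunk : String) : Nat → List Int → Int → List Int
  | 0, pos, _ => pos
  | fuel + 1, pos, j =>
    if j = -1 then pos
    else pvWhileB t chunk fuel (pos ++ [j]) (PySem.Str.findFrom t chunk (j + 1) none)

-- the genexpr 'pos[k] - pos[k-1] for k in range(1, len(pos))'
def pvGaps (pos : List Int) : List Int :=
  (PySem.List.pyRange 1 (pos.length : Int) 1).map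
    (fun k => PySem.List.pyGetD pos k 0 - PySem.List.pyGetD pos (k - 1) 0)

-- one iteration of B's scan: skip seen chunks, else enumerate occurrences with find and emit
def pvStepB (t : String) (n : Int) (st : PySem.Set String × PySem.Dict String (List Int))
    (i : Int) : PySem.Set String × PySem.Dict String (List Int) :=
  let chunk := PySem.Str.slice t (some i) (some (i + n))
  if st.1.contains chunk then st
  else
    let seen := st.1.add chunk
    let pos := pvWhileB t chunk (t.toList.length + 2) [i]
      (PySem.Str.findFrom t chunk (i + 1) none)
    if pos.length > 1 then
      (seen, st.2.insert chunk (st.2.getD chunk [] ++ pvGaps pos))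
    else (seen, st.2)

def pvInnerB (t : String) (n : Int) (results : PySem.Dict String (List Int)) :
    PySem.Dict String (List Int) :=
  ((PySem.List.pyRange 0 (PySem.Str.len t - n + 1) 1).foldl (pvStepB t n)
    (PySem.Set.ofList [], results)).2

def kasiski_examination_alt (text : String) (min_len : Int) (max_len : Int) :
    List (String × List Int) :=
  let t := pvClean text
  ((PySem.List.pyRange min_len (max_len + 1) 1).foldl
    (fun results n => pvInnerB t n results) PySem.Dict.empty).items

-- ===== PRECONDITION & SPEC =====
-- For a negative n-gram length n (min_len ≤ -1, reachable since range(min_len, max_len+1) is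
-- nonempty iff min_len ≤ max_len) A slices t[i:i+n] = '' for i up to len(t)-n, PAST the end of
-- the text, and so returns phantom '' gap lists of length len(t)-n; B's find-based enumeration
-- stops at the end of the text, the intended behaviour (n-grams of negative length do not exist).
def D_kasiski_examination (text : String) (min_len : Int) (max_len : Int) : Prop :=
  min_len ≤ -1 ∧ min_len ≤ max_len
instance (text : String) (min_len : Int) (max_len : Int) :
    Decidable (D_kasiski_examination text min_len max_len) := by
  unfold D_kasiski_examination; infer_instance

def Spec_kasiski_examination (text : String) (min_len : Int) (max_len : Int) (out : List (String × List Int)) : Prop := ¬ D_kasiski_examination text min_len max_len → out = kasiski_examination_alt text min_len max_len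
instance (text : String) (min_len : Int) (max_len : Int) (out : List (String × List Int)) : Decidable (Spec_kasiski_examination text min_len max_len out) := by unfold Spec_kasiski_examination; infer_instance

def pvDiffWitness_kasiski_examination : String × Int × Int := ("", -1, -1)
def pvDiffWitnessOut_kasiski_examination :
    (List (String × List Int)) × (List (String × List Int)) := ([("", [1])], [])

-- ===== CLAIM (what is proved, stated in full; the proofs are below) =====
def Claim_unchanged_kasiski_examination : Prop := ∀ (text : String) (min_len : Int) (max_len : Int), Dom_kasiski_examination text min_len max_len → Spec_kasiski_examination text min_len max_len (kasiski_examination text min_len max_len)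
def Claim_changed_kasiski_examination : Prop := Dom_kasiski_examination (pvDiffWitness_kasiski_examination.1) (pvDiffWitness_kasiski_examination.2.1) (pvDiffWitness_kasiski_examination.2.2) ∧ D_kasiski_examination (pvDiffWitness_kasiski_examination.1) (pvDiffWitness_kasiski_examination.2.1) (pvDiffWitness_kasiski_examination.2.2) ∧ kasiski_examination (pvDiffWitness_kasiski_examination.1) (pvDiffWitness_kasiski_examination.2.1) (pvDiffWitness_kasiski_examination.2.2) = pvDiffWitnessOut_kasiski_examination.1 ∧ kasiski_examination_alt (pvDiffWitness_kasiski_examination.1) (pvDiffWitness_kasiski_examination.2.1) (pvDiffWitness_kasiski_examination.2.2) = pvDiffWitnessOut_kasiski_examination.2 ∧ pvDiffWitnessOut_kasiski_examination.1 ≠ pvDiffWitnessOut_kasiski_examination.2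

-- ===== LEMMAS AND PROOFS =====

-- the chunk read at position i (definitionally the slice both ports take)
def pvF (t : String) (n i : Int) : String := PySem.Str.slice t (some i) (some (i + n))

-- the occurrence positions of chunk c in [a, len(t)-n+1), in increasing order
def pvOcc (t : String) (n : Int) (c : String) (a : Int) : List Int :=
  (PySem.List.pyRange a (PySem.Str.len t - n + 1) 1).filter (fun j => pvF t n j == c)

-- the indices at which the scan meets a chunk for the first time (seen-list s)
def pvFirsts (f : Int → String) : List Int → List String → List Int
  | [], _ => []
  | i :: r, seen => if f i ∈ seen then pvFirsts f r seen else i :: pvFirsts f r (seen ++ [f i])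

-- the position list B builds at index i, and what B does at a first occurrence
def pvPosB (t : String) (n i : Int) : List Int :=
  pvWhileB t (pvF t n i) (t.toList.length + 2) [i]
    (PySem.Str.findFrom t (pvF t n i) (i + 1) none)
def pvEmitB (t : String) (n : Int) (r : PySem.Dict String (List Int)) (i : Int) :
    PySem.Dict String (List Int) :=
  if (pvPosB t n i).length > 1 then
    r.insert (pvF t n i) (r.getD (pvF t n i) [] ++ pvGaps (pvPosB t n i))
  else r

theorem pvMatch_iff (t : String) (n : Int) (c : String) (hn : 0 ≤ n)
    (hc : c.toList.length = n.toNat) (j : Int) (hj : 0 ≤ j) :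
    ((pvF t n j == c) = true) ↔ c.toList <+: t.toList.drop j.toNat := by
  rw [beq_iff_eq, List.prefix_iff_eq_take, hc]
  constructor
  · intro h
    rw [← h]
    simp only [pvF, pysem]
    rw [PySem.List.slice_toNat t.toList hj (by omega)]
    congr 1
    omega
  · intro h
    apply String.toList_inj.mp
    simp only [pvF, pysem]
    rw [PySem.List.slice_toNat t.toList hj (by omega), show (j + n).toNat - j.toNat = n.toNat by omega]
    exact h.symm
theorem pvMatch_le (t : String) (n : Int) (c : String) (hn : 0 ≤ n)
    (hc : c.toList.length = n.toNat) (j : Int) (hj : 0 ≤ j) (hjl : j ≤ (t.toList.length : Int))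
    (h : c.toList <+: t.toList.drop j.toNat) : j ≤ (t.toList.length : Int) - n := by
  have h2 := h.length_le
  rw [List.length_drop, hc] at h2
  omega
theorem pvFilterRange_cons {p : Int → Bool} : ∀ (fuel : Nat) (a b j : Int) (rest : List Int),
    (b - a).toNat ≤ fuel →
    (PySem.List.pyRange a b 1).filter p = j :: rest →
    rest = (PySem.List.pyRange (j + 1) b 1).filter p ∧ a ≤ j ∧ j < b ∧ p j = true ∧
      ∀ x, a ≤ x → x < j → p x = false := by
  intro fuel
  induction fuel with
  | zero =>
    intro a b j rest hf h
    rw [PySem.List.pyRange_one_eq_nil (by omega)] at h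
    simp at h
  | succ fuel ih =>
    intro a b j rest hf h
    by_cases hab : a < b
    · rw [PySem.List.pyRange_one_cons hab, List.filter_cons] at h
      by_cases hpa : p a = true
      · rw [if_pos hpa] at h
        obtain ⟨rfl, rfl⟩ : a = j ∧ (PySem.List.pyRange (a+1) b 1).filter p = rest := by
          constructor <;> [exact (List.cons.injEq .. ▸ h).1; exact (List.cons.injEq .. ▸ h).2]
        exact ⟨rfl, le_refl _, hab, hpa, fun x hx1 hx2 => absurd (lt_of_lt_of_le hx2 hx1) (by omega)⟩
      · rw [if_neg hpa] at h
        obtain ⟨h1, h2, h3, h4, h5⟩ := ih (a+1) b j rest (by omega) h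
        refine ⟨h1, by omega, h3, h4, fun x hx1 hx2 => ?_⟩
        rcases eq_or_lt_of_le hx1 with rfl | hx
        · simpa using hpa
        · exact h5 x (by omega) hx2
    · rw [PySem.List.pyRange_one_eq_nil (by omega)] at h
      simp at h
theorem pvGet?_mk_map (f : Int → String) (g : Int → List Int) (F : List Int) (c : String) :
    (PySem.Dict.mk (F.map (fun i => (f i, g i)))).get? c =
      (F.find? (fun i => f i == c)).map g := by
  induction F with
  | nil => rfl
  | cons i F ih =>
    simp only [List.map_cons, PySem.Dict.get?_mk_cons, List.find?_cons]
    by_cases h : (f i == c) = true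
    · simp [h]
    · simp only [Bool.not_eq_true] at h
      simp [h, ih]

theorem pvFirsts_mem_map (f : Int → String) :
    ∀ (l : List Int) (s : List String) (c : String),
    (c ∈ (pvFirsts f l s).map f) ↔ (c ∉ s ∧ c ∈ l.map f) := by
  intro l
  induction l with
  | nil => intro s c; simp [pvFirsts]
  | cons i r ih =>
    intro s c
    by_cases h : f i ∈ s
    · rw [pvFirsts, if_pos h, ih]
      simp only [List.map_cons, List.mem_cons]
      constructor
      · rintro ⟨h1, h2⟩; exact ⟨h1, Or.inr h2⟩
      · rintro ⟨h1, h2 | h3⟩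
        · exact absurd (h2 ▸ h) h1
        · exact ⟨h1, h3⟩
    · rw [pvFirsts, if_neg h]
      simp only [List.map_cons, List.mem_cons, ih, List.mem_append]
      constructor
      · rintro (rfl | ⟨h1, h2⟩)
        · exact ⟨h, Or.inl rfl⟩
        · exact ⟨fun hs => h1 (Or.inl hs), Or.inr h2⟩
      · rintro ⟨h1, rfl | h2⟩
        · exact Or.inl rfl
        · by_cases hce : c = f i
          · exact Or.inl hce
          · refine Or.inr ⟨fun hh => ?_, h2⟩
            simp only [List.mem_append, List.mem_cons, List.not_mem_nil, or_false] at hh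
            tauto

theorem pvFirsts_snoc (f : Int → String) :
    ∀ (l : List Int) (s : List String) (i : Int),
    pvFirsts f (l ++ [i]) s =
      pvFirsts f l s ++ (if f i ∈ s ∨ f i ∈ l.map f then [] else [i]) := by
  intro l
  induction l with
  | nil =>
    intro s i
    by_cases h : f i ∈ s <;> simp [pvFirsts, h]
  | cons a r ih =>
    intro s i
    simp only [List.cons_append, pvFirsts]
    by_cases h : f a ∈ s
    · rw [if_pos h, if_pos h, ih]
      congr 1
      by_cases h2 : f i ∈ s ∨ f i ∈ r.map f
      · rw [if_pos h2, if_pos]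
        simp only [List.map_cons, List.mem_cons]
        tauto
      · rw [if_neg h2, if_neg]
        simp only [List.map_cons, List.mem_cons]
        rintro (h3 | he | h4)
        · exact h2 (Or.inl h3)
        · exact h2 (Or.inl (he ▸ h))
        · exact h2 (Or.inr h4)
    · rw [if_neg h, if_neg h, ih, List.cons_append]
      congr 2
      by_cases h2 : f i ∈ s ++ [f a] ∨ f i ∈ r.map f
      · rw [if_pos h2, if_pos]
        simp only [List.mem_append, List.mem_singleton, List.map_cons, List.mem_cons] at h2 ⊢
        tauto
      · rw [if_neg h2, if_neg]
        simp only [List.mem_append, List.mem_singleton, List.map_cons, List.mem_cons] at h2 ⊢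
        tauto

theorem pvFirsts_range_mem (f : Int → String) : ∀ (fuel : Nat) (a b : Int) (s : List String)
    (i : Int), (b - a).toNat ≤ fuel → i ∈ pvFirsts f (PySem.List.pyRange a b 1) s →
    a ≤ i ∧ i < b ∧ f i ∉ s ∧ ∀ j, a ≤ j → j < i → f j ≠ f i := by
  intro fuel
  induction fuel with
  | zero =>
    intro a b s i hf h
    rw [PySem.List.pyRange_one_eq_nil (by omega)] at h
    simp [pvFirsts] at h
  | succ fuel ih =>
    intro a b s i hf h
    by_cases hab : a < b
    · rw [PySem.List.pyRange_one_cons hab, pvFirsts] at h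
      by_cases hm : f a ∈ s
      · rw [if_pos hm] at h
        obtain ⟨h1, h2, h3, h4⟩ := ih (a+1) b s i (by omega) h
        refine ⟨by omega, h2, h3, fun j hj1 hj2 => ?_⟩
        rcases eq_or_lt_of_le hj1 with rfl | hj
        · intro he; exact h3 (he ▸ hm)
        · exact h4 j (by omega) hj2
      · rw [if_neg hm] at h
        rcases List.mem_cons.mp h with rfl | h
        · exact ⟨le_refl _, hab, hm, fun j hj1 hj2 => absurd (lt_of_lt_of_le hj2 hj1) (by omega)⟩
        · obtain ⟨h1, h2, h3, h4⟩ := ih (a+1) b (s ++ [f a]) i (by omega) h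
          simp only [List.mem_append, List.mem_singleton] at h3
          push_neg at h3
          refine ⟨by omega, h2, h3.1, fun j hj1 hj2 => ?_⟩
          rcases eq_or_lt_of_le hj1 with rfl | hj
          · exact fun he => h3.2 he.symm
          · exact h4 j (by omega) hj2
    · rw [PySem.List.pyRange_one_eq_nil (by omega)] at h
      simp [pvFirsts] at h

theorem pvFind_head (t : String) (n : Int) (c : String) (hn : 0 ≤ n)
    (hc : c.toList.length = n.toNat) (a : Int) (ha : 0 ≤ a) :
    PySem.Str.findFrom t c a none =
      (match pvOcc t n c a with | [] => -1 | j :: _ => j) := by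
  rw [PySem.Str.findFrom_eq]
  by_cases hgt : (t.toList.length : Int) < a
  · have hocc : pvOcc t n c a = [] := by
      unfold pvOcc
      rw [PySem.Str.len_eq, PySem.List.pyRange_one_eq_nil (by omega)]
      rfl
    rw [hocc]
    simp only [PySem.Chars.findFrom]
    rw [if_neg (by omega : ¬ a < 0), if_pos (by exact_mod_cast hgt)]
  have hle : a.toNat ≤ t.toList.length := by omega
  have hak : ((a.toNat : Nat) : Int) = a := by omega
  rw [← hak, PySem.Chars.findFrom_natCast t.toList c.toList a.toNat hle]
  set k := a.toNat with hk
  by_cases hF : PySem.Chars.find (t.toList.drop k) c.toList = -1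
  · have hocc : pvOcc t n c a = [] := by
      unfold pvOcc
      rw [List.filter_eq_nil_iff]
      intro j hj
      rw [PySem.Str.len_eq] at hj
      rw [PySem.List.mem_pyRange_one] at hj
      intro hp
      have hpre := (pvMatch_iff t n c hn hc j (by omega)).mp hp
      rw [PySem.Chars.find_eq_neg_one_iff, ← PySem.Chars.isIn_iff_infix,
        ← PySem.Chars.exists_prefix_drop_iff_isIn] at hF
      exact hF ⟨j.toNat - k, by
        rw [List.drop_drop, Nat.add_sub_cancel' (by omega : k ≤ j.toNat)]; exact hpre⟩
    rw [hak, hocc, if_pos hF]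
  · have hF0 : 0 ≤ PySem.Chars.find (t.toList.drop k) c.toList := by
      have := PySem.Chars.neg_one_le_find (t.toList.drop k) c.toList
      omega
    obtain ⟨hpre, hmin⟩ := PySem.Chars.find_spec hF0
    rw [List.drop_drop] at hpre
    set F := PySem.Chars.find (t.toList.drop k) c.toList with hFdef
    have hFlen : F ≤ ((t.toList.drop k).length : Int) := PySem.Chars.find_le_length _ _
    rw [List.length_drop] at hFlen
    have hjl : a + F ≤ (t.toList.length : Int) := by omega
    have hpstar : (pvF t n (a + F) == c) = true := by
      rw [pvMatch_iff t n c hn hc (a + F) (by omega)]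
      rw [show (a + F).toNat = k + F.toNat by omega]
      exact hpre
    have hstarlt : a + F < PySem.Str.len t - n + 1 := by
      have := pvMatch_le t n c hn hc (a + F) (by omega) hjl
        ((pvMatch_iff t n c hn hc (a + F) (by omega)).mp hpstar)
      rw [PySem.Str.len_eq]
      omega
    rw [hak]
    cases hocc : pvOcc t n c a with
    | nil =>
      exfalso
      unfold pvOcc at hocc
      rw [List.filter_eq_nil_iff] at hocc
      refine hocc (a + F) ?_ hpstar
      rw [PySem.List.mem_pyRange_one]
      exact ⟨by omega, hstarlt⟩
    | cons j rest =>
      unfold pvOcc at hocc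
      obtain ⟨_, hja, hjb, hpj, hearly⟩ :=
        pvFilterRange_cons (p := (fun j => pvF t n j == c))
          ((PySem.Str.len t - n + 1 - a).toNat) a _ j rest (le_refl _) hocc
      have hjge : a + F ≤ j := by
        by_contra hlt
        push_neg at hlt
        have hjpre := (pvMatch_iff t n c hn hc j (by omega)).mp hpj
        have hm2 := hmin (j.toNat - k) (by omega)
        rw [List.drop_drop, Nat.add_sub_cancel' (by omega : k ≤ j.toNat)] at hm2
        exact hm2 hjpre
      have hjle : j ≤ a + F := by
        by_contra hlt
        push_neg at hlt
        exact absurd hpstar (by rw [hearly (a + F) (by omega) hlt]; simp)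
      rw [if_neg hF]
      show a + F = j
      omega

theorem pvWhileB_spec (t : String) (n : Int) (c : String) (hn : 0 ≤ n)
    (hc : c.toList.length = n.toNat) :
    ∀ (fuel : Nat) (a : Int) (pos : List Int), 0 ≤ a → (pvOcc t n c a).length < fuel →
    pvWhileB t c fuel pos (PySem.Str.findFrom t c a none) = pos ++ pvOcc t n c a := by
  intro fuel
  induction fuel with
  | zero => intro a pos ha hlen; exact absurd hlen (Nat.not_lt_zero _)
  | succ fuel ih =>
    intro a pos ha hlen
    rw [pvFind_head t n c hn hc a ha]
    cases hocc : pvOcc t n c a with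
    | nil => simp [pvWhileB]
    | cons j rest =>
      have hocc' := hocc
      unfold pvOcc at hocc'
      obtain ⟨hrest, hja, hjb, hpj, _⟩ :=
        pvFilterRange_cons (p := (fun j => pvF t n j == c))
          ((PySem.Str.len t - n + 1 - a).toNat) a _ j rest (le_refl _) hocc'
      have hocc2 : pvOcc t n c (j + 1) = rest := hrest.symm
      have hrec := ih (j + 1) (pos ++ [j]) (by omega)
        (by rw [hocc2]; rw [hocc] at hlen; simpa using hlen)
      show pvWhileB t c (fuel + 1) pos j = pos ++ (j :: rest)
      rw [pvWhileB, if_neg (by omega : ¬ j = -1), hrec, hocc2]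
      simp

theorem pvDistLoop_eq (ps : List Int) : pvDistLoop ps = pvGaps ps := by
  unfold pvDistLoop pvGaps
  rw [PySem.List.foldl_append_singleton_eq_map, List.nil_append]

theorem pvLen_chunk (t : String) (n i : Int) (hn : 0 ≤ n) (hi : 0 ≤ i)
    (hle : i + n ≤ (t.toList.length : Int)) : (pvF t n i).toList.length = n.toNat := by
  simp only [pvF, pysem]
  rw [show i + n = (((i + n).toNat : Nat) : Int) by omega,
    show i = (((i).toNat : Nat) : Int) by omega,
    PySem.List.clampIdx_natCast, PySem.List.clampIdx_natCast]
  omega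

theorem pvOcc_split (t : String) (n i : Int) (hn : 0 ≤ n) (hi : 0 ≤ i)
    (hlt : i < PySem.Str.len t - n + 1)
    (hfirst : ∀ j, 0 ≤ j → j < i → pvF t n j ≠ pvF t n i) :
    pvOcc t n (pvF t n i) 0 = i :: pvOcc t n (pvF t n i) (i + 1) := by
  unfold pvOcc
  rw [PySem.List.pyRange_one_append 0 i (PySem.Str.len t - n + 1) hi (by omega),
    List.filter_append]
  have h1 : (PySem.List.pyRange 0 i 1).filter (fun j => pvF t n j == pvF t n i) = [] := by
    rw [List.filter_eq_nil_iff]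
    intro j hj
    rw [PySem.List.mem_pyRange_one] at hj
    simpa using hfirst j hj.1 hj.2
  rw [h1, List.nil_append, PySem.List.pyRange_one_cons (by omega), List.filter_cons,
    if_pos (by simp)]

theorem pvInnerA_items (t : String) (n : Int) : ∀ (pre : List Int),
    (pre.foldl (pvStepA t n) PySem.Dict.empty).items =
      (pvFirsts (pvF t n) pre []).map
        (fun i => (pvF t n i, pre.filter (fun j => pvF t n j == pvF t n i))) := by
  intro pre
  induction pre using List.reverseRecOn with
  | nil => rfl
  | append_singleton pre i ih =>
    rw [List.foldl_append, List.foldl_cons, List.foldl_nil]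
    set f := pvF t n with hf
    set c := f i with hcdef
    set d := pre.foldl (pvStepA t n) PySem.Dict.empty with hd
    have hstep : pvStepA t n d i = d.insert c (d.getD c [] ++ [i]) := rfl
    rw [hstep]
    set F := pvFirsts f pre [] with hF
    have hdmk : d = PySem.Dict.mk (F.map (fun i' => (f i', pre.filter (fun j => f j == f i')))) :=
      PySem.Dict.ext ih
    have hkeys : d.keys = F.map f := by
      rw [hdmk]; simp [PySem.Dict.keys]
    have hget : d.get? c = (F.find? (fun i' => f i' == c)).map
        (fun i' => pre.filter (fun j => f j == f i')) := by
      rw [hdmk, pvGet?_mk_map]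
    by_cases hmem : c ∈ pre.map f
    · have hcF : c ∈ F.map f := (pvFirsts_mem_map f pre [] c).mpr ⟨by simp, hmem⟩
      have hcont : d.contains c = true := by
        rw [PySem.Dict.contains_eq_decide_mem_keys, hkeys]
        simpa using hcF
      cases hfind : F.find? (fun i' => f i' == c) with
      | none =>
        exfalso
        rw [List.find?_eq_none] at hfind
        obtain ⟨i0, hi0, hfi0⟩ := List.mem_map.mp hcF
        exact hfind i0 hi0 (by simp [hfi0])
      | some i0 =>
        have hfi0 : f i0 = c := by
          have := List.find?_some hfind
          simpa using this
        have hgetD : d.getD c [] = pre.filter (fun j => f j == f i0) :=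
          PySem.Dict.getD_of_get?_eq_some d [] (by rw [hget, hfind]; rfl)
        rw [PySem.Dict.items_insert, if_pos hcont, ih, pvFirsts_snoc, if_pos (Or.inr hmem),
          List.append_nil, List.map_map]
        apply List.map_congr_left
        intro i' hi'
        by_cases hb : f i' = c
        · simp only [Function.comp_apply, hb, beq_self_eq_true, if_pos, hgetD,
            List.filter_append, hfi0]
          have h1 : List.filter (fun j => f j == c) [i] = [i] := by
            simp [List.filter, ← hcdef]
          rw [h1]
        · have hbne : (f i' == c) = false := by simpa using hb
          simp only [Function.comp_apply, hbne, Bool.false_eq_true, if_false,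
            List.filter_append]
          have : (f i == f i') = false := by
            rw [← hcdef]
            simpa using fun h => hb h.symm
          simp [this]
    · have hcF : c ∉ F.map f := fun h => hmem ((pvFirsts_mem_map f pre [] c).mp h).2
      have hcont : d.contains c = false := by
        rw [PySem.Dict.contains_eq_decide_mem_keys, hkeys]
        simpa using hcF
      have hgetD : d.getD c [] = [] := by
        apply PySem.Dict.getD_of_get?_eq_none
        rw [hget, List.find?_eq_none.mpr]
        · rfl
        · intro i' hi'
          simp only [beq_iff_eq]
          exact fun h => hcF (List.mem_map.mpr ⟨i', hi', h⟩)
      rw [PySem.Dict.items_insert, hcont, if_neg (by simp), hgetD, ih, pvFirsts_snoc,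
        if_neg (by simpa using hmem), List.map_append]
      congr 1
      · apply List.map_congr_left
        intro i' hi'
        have hne : (f i == f i') = false := by
          simp only [beq_eq_false_iff_ne, ne_eq]
          intro h
          exact hcF (List.mem_map.mpr ⟨i', hi', h.symm.trans hcdef.symm⟩)
        rw [List.filter_append]
        simp [hne]
      · simp only [List.map_cons, List.map_nil, List.filter_append]
        have hnil : pre.filter (fun j => f j == f i) = [] := by
          rw [List.filter_eq_nil_iff]
          intro j hj
          simp only [beq_iff_eq]
          intro h
          exact hmem (List.mem_map.mpr ⟨j, hj, h.trans hcdef.symm⟩)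
        rw [← hcdef] at hnil ⊢
        simp [hnil, List.filter, ← hcdef]


theorem pvInnerB_fold (t : String) (n : Int) :
    ∀ (is : List Int) (S : PySem.Set String) (sl : List String)
      (r : PySem.Dict String (List Int)),
      (∀ c, (S.contains c = true) ↔ c ∈ sl) →
      (is.foldl (pvStepB t n) (S, r)).2 = (pvFirsts (pvF t n) is sl).foldl (pvEmitB t n) r := by
  intro is
  induction is with
  | nil => intro S sl r H; rfl
  | cons i rest ih =>
    intro S sl r H
    rw [List.foldl_cons]
    have hpvF : PySem.Str.slice t (some i) (some (i + n)) = pvF t n i := rfl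
    by_cases hm : pvF t n i ∈ sl
    · have hcont : S.contains (pvF t n i) = true := (H (pvF t n i)).mpr hm
      have hstep : pvStepB t n (S, r) i = (S, r) := by
        simp only [pvStepB, hpvF, hcont, if_true]
      rw [hstep, pvFirsts, if_pos hm]
      exact ih S sl r H
    · have hcont : S.contains (pvF t n i) = false := by
        rw [← Bool.not_eq_true]
        exact fun h => hm ((H (pvF t n i)).mp h)
      have hstep : pvStepB t n (S, r) i = (S.add (pvF t n i), pvEmitB t n r i) := by
        simp only [pvStepB, pvEmitB, pvPosB, hpvF, hcont, Bool.false_eq_true, if_false]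
        split <;> rfl
      have H' : ∀ x, ((S.add (pvF t n i)).contains x = true) ↔ x ∈ sl ++ [pvF t n i] := by
        intro x
        simp only [PySem.Set.add, hcont, Bool.false_eq_true, if_false]
        simp only [PySem.Set.contains] at H ⊢
        rw [List.contains_iff_mem]
        simp only [List.mem_append, List.mem_cons, List.not_mem_nil, or_false]
        constructor
        · rintro (hx | hx)
          · exact Or.inl ((H x).mp (List.contains_iff_mem.mpr hx))
          · exact Or.inr hx
        · rintro (hx | hx)
          · exact Or.inl (List.contains_iff_mem.mp ((H x).mpr hx))
          · exact Or.inr hx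
      rw [hstep, pvFirsts, if_neg hm, List.foldl_cons]
      exact ih (S.add (pvF t n i)) (sl ++ [pvF t n i]) (pvEmitB t n r i) H'

theorem pvRound_eq (t : String) (n : Int) (hn : 0 ≤ n)
    (r : PySem.Dict String (List Int)) :
    pvInnerB t n r = pvCollectA (pvInnerA t n) r := by
  unfold pvInnerB pvCollectA pvInnerA
  rw [pvInnerB_fold t n _ (PySem.Set.ofList []) [] r
    (by
      intro c
      simp only [PySem.Set.contains, PySem.Set.ofList, List.foldl_nil]
      rw [List.contains_iff_mem]
      constructor
      · intro h; cases h
      · intro h; cases h)]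
  rw [pvInnerA_items, List.foldl_map]
  apply PySem.List.foldl_congr_mem
  intro racc i hi
  obtain ⟨hi0, hilt, _, hfirst⟩ := pvFirsts_range_mem (pvF t n)
    ((PySem.Str.len t - n + 1 - 0).toNat) 0 (PySem.Str.len t - n + 1) [] i (le_refl _) hi
  have hL : i + n ≤ (t.toList.length : Int) := by
    rw [PySem.Str.len_eq] at hilt; omega
  have hc : (pvF t n i).toList.length = n.toNat := pvLen_chunk t n i hn hi0 hL
  have hlenb : (pvOcc t n (pvF t n i) (i + 1)).length < t.toList.length + 2 := by
    have h1 := List.length_filter_le (fun j => pvF t n j == pvF t n i)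
      (PySem.List.pyRange (i + 1) (PySem.Str.len t - n + 1) 1)
    rw [PySem.List.length_pyRange_one] at h1
    unfold pvOcc
    rw [PySem.Str.len_eq] at h1 ⊢
    omega
  have hpos := pvWhileB_spec t n (pvF t n i) hn hc (t.toList.length + 2) (i + 1) [i]
    (by omega) hlenb
  have hsplit := pvOcc_split t n i hn hi0 hilt hfirst
  show pvEmitB t n racc i =
    (if (pvOcc t n (pvF t n i) 0).length > 1 then
      racc.insert (pvF t n i) (racc.getD (pvF t n i) [] ++ pvDistLoop (pvOcc t n (pvF t n i) 0))
    else racc)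
  unfold pvEmitB pvPosB
  rw [hpos, List.singleton_append, ← hsplit, pvDistLoop_eq]

-- ===== VERDICT (by name: the statements are the Claim_ definitions above) =====
theorem kasiski_examination_spec : Claim_unchanged_kasiski_examination := by
  intro text min_len max_len _ hD
  unfold D_kasiski_examination at hD
  show kasiski_examination text min_len max_len = kasiski_examination_alt text min_len max_len
  simp only [kasiski_examination, kasiski_examination_alt]
  congr 1
  apply PySem.List.foldl_congr_mem
  intro racc m hmem
  rw [PySem.List.mem_pyRange_one] at hmem
  have h0 : 0 ≤ m := by
    by_contra hneg
    exact hD ⟨by omega, by omega⟩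
  exact (pvRound_eq (pvClean text) m h0 racc).symm

theorem kasiski_examination_changed : Claim_changed_kasiski_examination := by
  unfold Claim_changed_kasiski_examination; decide
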